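-- pv_equiv track=rewrite | github.com/datascopeanalytics/outlier | web/web.py | get_chosen_options
-- ===== SOURCE A (Python) =====
-- def get_chosen_options(raw_data):
--     #get unique options with sets
--     chosen_options = {"grade": set(), "district": set()};
--     for response in raw_data:
--         chosen_options["grade"].add(response["grade"])
--         chosen_options["district"].add(response["district"])
--
--     # sort grades
--     chosen_options["grade"] = sorted(list(chosen_options["grade"]))
--     if('K' in chosen_options["grade"]):
--         chosen_options["grade"].remove('K')
--         chosen_options["grade"].insert(0,'K')
--     if('4 & 5' in chosen_options["grade"]):
--         chosen_options["grade"].remove('4 & 5')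
--
--     # sort districts
--     chosen_options["district"] = sorted(list(chosen_options["district"]))
--     return chosen_options
-- ===== SOURCE B (Python) =====
-- def _insert_unique(lst, x):
--     """Insert x into the ascending list lst, keeping it sorted; no-op if present."""
--     i = 0
--     while i < len(lst) and lst[i] < x:
--         i += 1
--     if i == len(lst) or lst[i] != x:
--         lst.insert(i, x)
--
--
-- def get_chosen_options(raw_data):
--     # One pass: maintain sorted, duplicate-free lists directly (no sets, no sorted()).
--     grades = []
--     districts = []
--     saw_k = False
--     for response in raw_data:
--         g = response["grade"]
--         if g == 'K':
--             saw_k = True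
--         elif g != '4 & 5':
--             _insert_unique(grades, g)
--         _insert_unique(districts, response["district"])
--     return {"grade": (['K'] if saw_k else []) + grades, "district": districts}
-- ===== Notes on version B (the rewrite author's own statement) =====
-- stated objective: alternative
-- what changed: B makes a single pass that maintains sorted duplicate-free lists by ordered insertion (no set objects and no sorted() call at all), records 'K' as a flag and skips '4 & 5' during the scan, whereas A accumulates sets, sorts them afterwards and patches the sorted grade list with remove/insert branches.
import Mathlib
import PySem

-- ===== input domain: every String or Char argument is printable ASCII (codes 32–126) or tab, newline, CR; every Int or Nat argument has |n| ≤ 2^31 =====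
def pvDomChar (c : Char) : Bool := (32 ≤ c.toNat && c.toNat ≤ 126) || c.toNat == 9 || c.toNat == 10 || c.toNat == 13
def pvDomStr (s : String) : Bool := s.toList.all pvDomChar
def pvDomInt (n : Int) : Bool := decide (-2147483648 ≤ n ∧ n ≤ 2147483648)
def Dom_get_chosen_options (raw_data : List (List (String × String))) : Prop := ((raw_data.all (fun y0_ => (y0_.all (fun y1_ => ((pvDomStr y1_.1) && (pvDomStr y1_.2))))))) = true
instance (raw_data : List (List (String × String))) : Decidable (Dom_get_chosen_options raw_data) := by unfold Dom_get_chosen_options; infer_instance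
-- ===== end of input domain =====

-- B replaces A's set-collect / sort-afterwards / patch-the-sorted-list pipeline by a single pass
-- that keeps sorted duplicate-free lists via ordered insertion, with no set and no sort call
-- (objective: alternative; same result, different algorithm).

-- response["grade"] / response["district"]: dict lookup; Pre_ guarantees the key is present,
-- so the `.getD ""` default is never taken on admitted inputs.
def pvGradeOf (r : List (String × String)) : String :=
  (PySem.Dict.get? (PySem.Dict.mk r) "grade").getD ""

def pvDistrictOf (r : List (String × String)) : String :=
  (PySem.Dict.get? (PySem.Dict.mk r) "district").getD ""

-- ===== PORT A =====
def get_chosen_options (raw_data : List (List (String × String))) : List (String × List String) :=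
  -- the dict {"grade": set, "district": set} carried as its two fields
  let sets : PySem.Set String × PySem.Set String :=
    raw_data.foldl (fun s r => (PySem.Set.add s.1 (pvGradeOf r), PySem.Set.add s.2 (pvDistrictOf r))) ([], [])
  let g1 := PySem.List.sorted sets.1 (fun x => x)
  let g2 := if "K" ∈ g1 then PySem.List.insert ((PySem.List.remove? g1 "K").getD g1) 0 "K" else g1
  let g3 := if "4 & 5" ∈ g2 then (PySem.List.remove? g2 "4 & 5").getD g2 else g2
  [("grade", g3), ("district", PySem.List.sorted sets.2 (fun x => x))]

-- ===== PORT B =====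
-- _insert_unique: walk past the smaller elements, then insert unless already present
def pvInsertUnique : List String → String → List String
  | [], x => [x]
  | y :: t, x =>
    if y < x then y :: pvInsertUnique t x
    else if y = x then y :: t
    else x :: y :: t

def get_chosen_options_alt (raw_data : List (List (String × String))) : List (String × List String) :=
  -- state (saw_k, grades, districts), updated once per response
  let st : Bool × List String × List String :=
    raw_data.foldl (fun st r =>
      let g := pvGradeOf r
      let st1 : Bool × List String :=
        if g = "K" then (true, st.2.1)
        else if g ≠ "4 & 5" then (st.1, pvInsertUnique st.2.1 g)
        else (st.1, st.2.1)
      (st1.1, st1.2, pvInsertUnique st.2.2 (pvDistrictOf r))) (false, [], [])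
  [("grade", (if st.1 then ["K"] else []) ++ st.2.1), ("district", st.2.2)]

-- ===== PRECONDITION & SPEC =====
-- Pre_ excludes responses missing a "grade" or "district" key, on which A raises KeyError.
def Pre_get_chosen_options (raw_data : List (List (String × String))) : Prop :=
  ∀ r ∈ raw_data, (PySem.Dict.get? (PySem.Dict.mk r) "grade").isSome = true ∧
    (PySem.Dict.get? (PySem.Dict.mk r) "district").isSome = true
instance (raw_data : List (List (String × String))) : Decidable (Pre_get_chosen_options raw_data) := by
  unfold Pre_get_chosen_options; infer_instance

def pvWitness_get_chosen_options : (List (List (String × String))) :=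
  [[("grade", "K"), ("district", "7")], [("grade", "4 & 5"), ("district", "7")]]

def Spec_get_chosen_options (raw_data : List (List (String × String))) (out : List (String × List String)) : Prop := out = get_chosen_options_alt raw_data
instance (raw_data : List (List (String × String))) (out : List (String × List String)) : Decidable (Spec_get_chosen_options raw_data out) := by unfold Spec_get_chosen_options; infer_instance

-- ===== CLAIM (what is proved, stated in full; the proofs are below) =====
def Claim_equal_get_chosen_options : Prop := ∀ (raw_data : List (List (String × String))), Dom_get_chosen_options raw_data → Pre_get_chosen_options raw_data → Spec_get_chosen_options raw_data (get_chosen_options raw_data)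

-- ===== LEMMAS AND PROOFS =====

-- A's fold over the pair of sets = two one-field folds
theorem pvFoldPair (l : List (List (String × String))) (s1 s2 : PySem.Set String) :
    l.foldl (fun s r => (PySem.Set.add s.1 (pvGradeOf r), PySem.Set.add s.2 (pvDistrictOf r))) (s1, s2)
      = ((l.map pvGradeOf).foldl PySem.Set.add s1, (l.map pvDistrictOf).foldl PySem.Set.add s2) := by
  induction l generalizing s1 s2 with
  | nil => rfl
  | cons r t ih => simpa using ih (PySem.Set.add s1 (pvGradeOf r)) (PySem.Set.add s2 (pvDistrictOf r))

-- sorted of a duplicate-free list is strictly increasing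
theorem pvSortedLt (xs : List String) (h : xs.Nodup) :
    (PySem.List.sorted xs (fun y => y)).Pairwise (· < ·) := by
  have hle := PySem.List.sorted_pairwise xs (fun y => y)
  have hnd : (PySem.List.sorted xs (fun y => y)).Nodup :=
    ((PySem.List.sorted_perm xs (fun y => y) false).nodup_iff).mpr h
  exact (hle.and hnd).imp (fun hab => lt_of_le_of_ne hab.1 hab.2)

-- erasing from the sorted list = sorting the filtered list (nodup input)
theorem pvEraseSorted (xs : List String) (h : xs.Nodup) (x : String) :
    (PySem.List.sorted xs (fun y => y)).erase x
      = PySem.List.sorted (xs.filter (fun y => y != x)) (fun y => y) := by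
  symm
  apply PySem.List.sorted_eq_of_perm_of_pairwise_lt
  · have hnd : (PySem.List.sorted xs (fun y => y)).Nodup :=
      ((PySem.List.sorted_perm xs (fun y => y) false).nodup_iff).mpr h
    rw [hnd.erase_eq_filter]
    exact (PySem.List.sorted_perm xs (fun y => y) false).filter _
  · exact (pvSortedLt xs h).sublist (List.erase_sublist ..)

-- A's guarded remove equals List.erase
theorem pvRemoveIf (l : List String) (v : String) :
    (if v ∈ l then (PySem.List.remove? l v).getD l else l) = l.erase v := by
  by_cases hv : v ∈ l
  · simp [hv, PySem.List.remove?_eq_some_erase l v hv]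
  · simp [hv, List.erase_of_not_mem hv]

-- characterisation of A's grade list, over any duplicate-free list of grades
theorem pvGradeEq (xs : List String) (h : xs.Nodup) :
    (let g1 := PySem.List.sorted xs (fun y => y)
     let g2 := if "K" ∈ g1 then PySem.List.insert ((PySem.List.remove? g1 "K").getD g1) 0 "K" else g1
     if "4 & 5" ∈ g2 then (PySem.List.remove? g2 "4 & 5").getD g2 else g2)
      = (if "K" ∈ xs then ["K"] else [])
          ++ PySem.List.sorted (xs.filter (fun g => g != "K" && g != "4 & 5")) (fun y => y) := by
  by_cases hK : "K" ∈ xs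
  · have hKL : "K" ∈ PySem.List.sorted xs (fun y => y) :=
      (PySem.List.mem_sorted xs (fun y => y) false "K").mpr hK
    simp only [hKL, if_pos, hK,
      PySem.List.remove?_eq_some_erase _ "K" hKL, Option.getD_some, PySem.List.insert_zero]
    rw [pvRemoveIf, pvEraseSorted xs h "K"]
    rw [List.erase_cons]
    have hb : (("K" : String) == "4 & 5") = false := by decide
    rw [hb]
    simp only [Bool.false_eq_true, if_false, List.singleton_append, List.cons.injEq, true_and]
    rw [pvEraseSorted _ (h.filter _) "4 & 5", List.filter_filter]
    congr 1
    apply List.filter_congr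
    intro a _
    rw [Bool.and_comm]
  · have hKL : "K" ∉ PySem.List.sorted xs (fun y => y) :=
      fun hm => hK ((PySem.List.mem_sorted xs (fun y => y) false "K").mp hm)
    simp only [hKL, if_neg, hK, not_false_iff]
    rw [pvRemoveIf, pvEraseSorted xs h "4 & 5", List.nil_append]
    congr 1
    apply List.filter_congr
    intro a ha
    have : a ≠ "K" := fun e => hK (e ▸ ha)
    simp [this]

-- membership after one ordered insertion
theorem pvMemInsertUnique (l : List String) (x a : String) :
    a ∈ pvInsertUnique l x ↔ a = x ∨ a ∈ l := by
  induction l with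
  | nil => simp [pvInsertUnique]
  | cons y t ih =>
    by_cases h1 : y < x
    · simp only [pvInsertUnique, if_pos h1, List.mem_cons, ih]; tauto
    · by_cases h2 : y = x
      · subst h2; simp [pvInsertUnique]
      · simp only [pvInsertUnique, if_neg h1, if_neg h2, List.mem_cons]

-- ordered insertion preserves strict sortedness
theorem pvPairwiseInsertUnique (l : List String) (x : String) (h : l.Pairwise (· < ·)) :
    (pvInsertUnique l x).Pairwise (· < ·) := by
  induction l with
  | nil => simp [pvInsertUnique]
  | cons y t ih =>
    rcases List.pairwise_cons.mp h with ⟨hy, ht⟩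
    by_cases h1 : y < x
    · simp only [pvInsertUnique, if_pos h1]
      refine List.pairwise_cons.mpr ⟨?_, ih ht⟩
      intro b hb
      rcases (pvMemInsertUnique t x b).mp hb with rfl | hb
      · exact h1
      · exact hy b hb
    · by_cases h2 : y = x
      · subst h2; simpa [pvInsertUnique, if_neg h1] using h
      · have hx : x < y := lt_of_le_of_ne (not_lt.mp h1) (fun e => h2 e.symm)
        simp only [pvInsertUnique, if_neg h1, if_neg h2]
        refine List.pairwise_cons.mpr ⟨?_, h⟩
        intro b hb
        rcases List.mem_cons.mp hb with rfl | hb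
        · exact hx
        · exact lt_trans hx (hy b hb)

-- folding ordered insertion keeps strict sortedness and collects exactly acc ∪ xs
theorem pvFoldInsertUnique (xs : List String) (acc : List String) (h : acc.Pairwise (· < ·)) :
    (xs.foldl pvInsertUnique acc).Pairwise (· < ·) ∧
      ∀ a, a ∈ xs.foldl pvInsertUnique acc ↔ a ∈ acc ∨ a ∈ xs := by
  induction xs generalizing acc with
  | nil => exact ⟨h, fun a => by simp⟩
  | cons x t ih =>
    obtain ⟨hp, hm⟩ := ih (pvInsertUnique acc x) (pvPairwiseInsertUnique acc x h)
    refine ⟨hp, fun a => ?_⟩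
    rw [List.foldl_cons, hm a, pvMemInsertUnique]
    simp only [List.mem_cons]; tauto

-- B's insertion-sort fold over any list = sorted(set(..)) of that list
theorem pvFoldEqSorted (xs : List String) :
    xs.foldl pvInsertUnique [] = PySem.List.sorted (PySem.Set.ofList xs) (fun y => y) := by
  obtain ⟨hp, hm⟩ := pvFoldInsertUnique xs [] (by simp)
  symm
  apply PySem.List.sorted_eq_of_perm_of_pairwise_lt
  · apply (List.perm_ext_iff_of_nodup hp.nodup (PySem.Set.nodup_ofList xs)).mpr
    intro a
    rw [hm a, PySem.Set.mem_ofList]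
    simp
  · exact hp

-- B's three-field fold splits into the flag, a grade fold over the filtered grades, and a district fold
theorem pvFoldSplit (l : List (List (String × String))) (b : Bool) (gs ds : List String) :
    l.foldl (fun st r =>
      let g := pvGradeOf r
      let st1 : Bool × List String :=
        if g = "K" then (true, st.2.1)
        else if g ≠ "4 & 5" then (st.1, pvInsertUnique st.2.1 g)
        else (st.1, st.2.1)
      (st1.1, st1.2, pvInsertUnique st.2.2 (pvDistrictOf r))) (b, gs, ds)
      = (b || (l.map pvGradeOf).any (fun g => g == "K"),
         ((l.map pvGradeOf).filter (fun g => g != "K" && g != "4 & 5")).foldl pvInsertUnique gs,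
         (l.map pvDistrictOf).foldl pvInsertUnique ds) := by
  induction l generalizing b gs ds with
  | nil => simp
  | cons r t ih =>
    rw [List.foldl_cons, ih]
    by_cases hK : pvGradeOf r = "K"
    · simp [hK]
    · have hb : (pvGradeOf r == "K") = false := by simp [hK]
      by_cases h45 : pvGradeOf r = "4 & 5" <;> simp [hK, h45, hb]

-- sorted(set(filter p l)) = sorted(filter p (set l))
theorem pvSortedOfListFilter (l : List String) (p : String → Bool) :
    PySem.List.sorted (PySem.Set.ofList (l.filter p)) (fun y => y)
      = PySem.List.sorted ((PySem.Set.ofList l).filter p) (fun y => y) := by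
  apply PySem.List.sorted_eq_of_perm_of_pairwise_lt
  · refine List.Perm.trans (PySem.List.sorted_perm _ _ false) ?_
    apply (List.perm_ext_iff_of_nodup ((PySem.Set.nodup_ofList l).filter p)
      (PySem.Set.nodup_ofList _)).mpr
    intro a
    simp [PySem.Set.mem_ofList, List.mem_filter]
  · exact pvSortedLt _ ((PySem.Set.nodup_ofList l).filter p)

-- the flag computed by B = membership of "K" in the grade set
theorem pvFlagEq (l : List String) :
    (l.any (fun g => g == "K")) = decide ("K" ∈ PySem.Set.ofList l) := by
  simp only [PySem.Set.mem_ofList]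
  induction l with
  | nil => simp
  | cons x t ih =>
    by_cases hx : x = "K"
    · simp [hx]
    · simp [hx, ih, Ne.symm hx]

-- ===== VERDICT (by name: the statement is the Claim_ definition above) =====
theorem get_chosen_options_spec : Claim_equal_get_chosen_options := by
  intro raw_data _ _
  unfold Spec_get_chosen_options get_chosen_options get_chosen_options_alt
  rw [pvFoldPair, ← PySem.Set.ofList_eq_foldl, ← PySem.Set.ofList_eq_foldl, pvFoldSplit]
  have hA := pvGradeEq (PySem.Set.ofList (raw_data.map pvGradeOf)) (PySem.Set.nodup_ofList _)
  dsimp only at hA ⊢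
  rw [hA, pvFoldEqSorted, pvFoldEqSorted, pvSortedOfListFilter, pvFlagEq]
  by_cases hK : "K" ∈ PySem.Set.ofList (raw_data.map pvGradeOf) <;> simp [hK]
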